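-- pv_equiv track=rewrite | github.com/yurad12/coding-test | Codility/Lesson 10/Flags.py | solution
-- ===== SOURCE A (Python) =====
-- def solution(A):
--     peaks = []
--     for i in range(1,len(A)-1):
--         if A[i-1] < A[i] and A[i] > A[i+1]:
--             peaks.append(i)
--
--     if not peaks:
--         return 0
--
--     if len(peaks) < 3:
--         return len(peaks)
--
--     def place(k):
--         last = peaks[0]
--         count = 1
--         for i in range(1,len(peaks)):
--             if peaks[i]-last >= k:
--                 count += 1
--                 last = peaks[i]
--             if count == k:
--                 return True
--         return False
--
--     answer = 0
--     start, end = 1, len(peaks)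
--     while start <= end:
--         mid = (start + end) // 2
--         if place(mid):
--             start = mid + 1
--             answer = mid
--         else:
--             end = mid - 1
--
--     return answer
-- ===== SOURCE B (Python) =====
-- def can_place(peaks, d):
--     m = len(peaks)
--     pos = peaks[0]
--     c = 1
--     while c < d:
--         x = pos + d
--         lo, hi = 0, m
--         while lo < hi:
--             mid = (lo + hi) // 2
--             if peaks[mid] < x:
--                 lo = mid + 1
--             else:
--                 hi = mid
--         if lo == m:
--             break
--         pos = peaks[lo]
--         c += 1
--     return c >= d
--
-- def solution(A):
--     n = len(A)
--     peaks = [i for i in range(1, n - 1) if A[i - 1] < A[i] > A[i + 1]]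
--     if not peaks:
--         return 0
--     span = peaks[-1] - peaks[0]
--     kmax = 1
--     while kmax * (kmax + 1) <= span:
--         kmax += 1
--     d = kmax
--     while d > 1 and not can_place(peaks, d):
--         d -= 1
--     return d
-- ===== Notes on version B (the rewrite author's own statement) =====
-- stated objective: faster
-- what changed: A binary-searches the flag count in [1, #peaks] re-running an O(#peaks) greedy pass per probe; B derives the upper bound kmax from the peak span via k(k+1) > span, then counts candidates down from kmax, verifying each with a greedy that jumps to the next reachable peak by binary search on the peak list, so the verification work is proportional to the flags placed instead of to the whole peak list.
import Mathlib
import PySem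

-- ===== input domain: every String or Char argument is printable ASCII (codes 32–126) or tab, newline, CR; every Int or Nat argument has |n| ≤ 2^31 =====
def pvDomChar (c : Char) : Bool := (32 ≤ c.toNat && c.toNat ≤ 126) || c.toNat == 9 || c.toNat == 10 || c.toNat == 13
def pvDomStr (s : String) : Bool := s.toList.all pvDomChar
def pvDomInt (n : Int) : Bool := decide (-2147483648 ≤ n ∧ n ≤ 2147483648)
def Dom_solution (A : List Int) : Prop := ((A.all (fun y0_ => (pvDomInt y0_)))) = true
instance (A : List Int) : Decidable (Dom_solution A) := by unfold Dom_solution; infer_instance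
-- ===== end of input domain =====

-- B re-implements Codility 'Flags': instead of A's binary search over candidate flag counts with an
-- O(P) greedy scan per probe, B bounds the answer by k(k+1) > span, then counts down from that bound,
-- checking each candidate by greedy binary-search jumps over the peak list (measured faster; same value).


-- ===== PORT A =====
def pvPeaks (A : List Int) : List Int :=
  (PySem.List.pyRange 1 (PySem.List.len A - 1) 1).foldl
    (fun acc i =>
      if PySem.List.pyGetD A (i - 1) 0 < PySem.List.pyGetD A i 0 ∧
          PySem.List.pyGetD A (i + 1) 0 < PySem.List.pyGetD A i 0
      then acc ++ [i] else acc) []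

def pvPlaceLoop (peaks : List Int) (k : Int) : List Int → Int → Int → Bool
  | [], _, _ => false
  | i :: is, last, count =>
    let p := PySem.List.pyGetD peaks i 0
    let s : Int × Int := if k ≤ p - last then (p, count + 1) else (last, count)
    if s.2 = k then true else pvPlaceLoop peaks k is s.1 s.2

def pvPlace (peaks : List Int) (k : Int) : Bool :=
  pvPlaceLoop peaks k (PySem.List.pyRange 1 (PySem.List.len peaks) 1)
    (PySem.List.pyGetD peaks 0 0) 1

def pvBsearch (peaks : List Int) (start e ans : Int) : Int :=
  if h : start ≤ e then
    let mid := PySem.Int.floordiv (start + e) 2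
    if pvPlace peaks mid then pvBsearch peaks (mid + 1) e mid
    else pvBsearch peaks start (mid - 1) ans
  else ans
termination_by (e - start + 1).toNat
decreasing_by
  · have h1 := PySem.Int.floordiv_two_mid_bounds (lo := start) (hi := e) h
    omega
  · have h1 := PySem.Int.floordiv_two_mid_bounds (lo := start) (hi := e) h
    omega

def solution (A : List Int) : Int :=
  let peaks := pvPeaks A
  if peaks = [] then 0
  else if PySem.List.len peaks < 3 then PySem.List.len peaks
  else pvBsearch peaks 1 (PySem.List.len peaks) 0

-- ===== PORT B =====
def altPeaks (A : List Int) : List Int :=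
  (PySem.List.pyRange 1 (PySem.List.len A - 1) 1).filter
    (fun i => decide (PySem.List.pyGetD A (i - 1) 0 < PySem.List.pyGetD A i 0 ∧
      PySem.List.pyGetD A (i + 1) 0 < PySem.List.pyGetD A i 0))

def altBisect (peaks : List Int) (x lo hi : Int) : Int :=
  if h : lo < hi then
    let mid := PySem.Int.floordiv (lo + hi) 2
    if PySem.List.pyGetD peaks mid 0 < x then altBisect peaks x (mid + 1) hi
    else altBisect peaks x lo mid
  else lo
termination_by (hi - lo).toNat
decreasing_by
  · have h1 := PySem.Int.floordiv_two_mid_bounds (lo := lo) (hi := hi) (le_of_lt h)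
    omega
  · have h1 : PySem.Int.floordiv (lo + hi) 2 < hi := by
      rw [PySem.Int.floordiv_lt_iff_lt_mul (by omega)]; omega
    omega

def altCanLoop (peaks : List Int) (d pos c : Int) : Int :=
  if h : c < d then
    let lo := altBisect peaks (pos + d) 0 (PySem.List.len peaks)
    if lo = PySem.List.len peaks then c
    else altCanLoop peaks d (PySem.List.pyGetD peaks lo 0) (c + 1)
  else c
termination_by (d - c).toNat
decreasing_by omega

def altCan (peaks : List Int) (d : Int) : Bool :=
  d ≤ altCanLoop peaks d (PySem.List.pyGetD peaks 0 0) 1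

def altKmax (span k : Int) : Int :=
  if h : k * (k + 1) ≤ span then altKmax span (k + 1) else k
termination_by (span + 2 - k).toNat
decreasing_by
  have hk : k < span + 1 := by nlinarith [sq_nonneg k]
  omega

def altDesc (peaks : List Int) (d : Int) : Int :=
  if h : 1 < d ∧ ¬ altCan peaks d then altDesc peaks (d - 1) else d
termination_by (d - 1).toNat
decreasing_by omega

def solution_alt (A : List Int) : Int :=
  let peaks := altPeaks A
  if peaks = [] then 0
  else
    let span := PySem.List.pyGetD peaks (-1) 0 - PySem.List.pyGetD peaks 0 0
    altDesc peaks (altKmax span 1)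

-- ===== PRECONDITION & SPEC =====
def Spec_solution (A : List Int) (out : Int) : Prop := out = solution_alt A
instance (A : List Int) (out : Int) : Decidable (Spec_solution A out) := by unfold Spec_solution; infer_instance

-- ===== CLAIM (what is proved, stated in full; the proofs are below) =====
def Claim_equal_solution : Prop := ∀ (A : List Int), Dom_solution A → Spec_solution A (solution A)

-- ===== LEMMAS AND PROOFS =====
def gcnt (d : Int) : List Int → Int → Int
  | [], _ => 0
  | p :: l, last => if d ≤ p - last then gcnt d l p + 1 else gcnt d l last

theorem gcnt_nonneg (d : Int) (l : List Int) (last : Int) : 0 ≤ gcnt d l last := by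
  induction l generalizing last with
  | nil => simp [gcnt]
  | cons p l ih => simp only [gcnt]; split <;> [linarith [ih p]; exact ih last]

theorem gcnt_le_length (d : Int) (l : List Int) (last : Int) : gcnt d l last ≤ l.length := by
  induction l generalizing last with
  | nil => simp [gcnt]
  | cons p l ih =>
    simp only [gcnt, List.length_cons]
    split
    · have := ih p; push_cast; omega
    · have := ih last; push_cast; omega

theorem gcnt_skip (d : Int) (l1 l2 : List Int) (last : Int)
    (h : ∀ q ∈ l1, q - last < d) : gcnt d (l1 ++ l2) last = gcnt d l2 last := by
  induction l1 with
  | nil => rfl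
  | cons p l1 ih =>
    simp only [List.cons_append, gcnt]
    rw [if_neg (by have := h p (by simp); omega)]
    exact ih (fun q hq => h q (by simp [hq]))

theorem gcnt_zero (d : Int) (l : List Int) (last : Int)
    (h : ∀ q ∈ l, q - last < d) : gcnt d l last = 0 := by
  have := gcnt_skip d l [] last h
  simpa using this

theorem gcnt_pos (d : Int) (l : List Int) (last : Int)
    (h : ∃ p ∈ l, d ≤ p - last) : 1 ≤ gcnt d l last := by
  induction l generalizing last with
  | nil => simp at h
  | cons p l ih =>
    simp only [gcnt]
    split
    · linarith [gcnt_nonneg d l p]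
    · rename_i hn
      rcases h with ⟨q, hq, hdq⟩
      rcases List.mem_cons.mp hq with rfl | hq'
      · omega
      · exact ih last ⟨q, hq', hdq⟩

theorem gcnt_span (d : Int) (l : List Int) (last c : Int) (h1 : 1 ≤ c)
    (hc : c ≤ gcnt d l last) : ∃ p ∈ l, last + c * d ≤ p := by
  induction l generalizing last c with
  | nil => simp [gcnt] at hc; omega
  | cons p l ih =>
    simp only [gcnt] at hc
    split at hc
    · rename_i hs
      by_cases h2 : c = 1
      · subst h2; exact ⟨p, by simp, by omega⟩
      · rcases ih p (c - 1) (by omega) (by omega) with ⟨q, hq, hle⟩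
        exact ⟨q, by simp [hq], by nlinarith⟩
    · rcases ih last c h1 hc with ⟨q, hq, hle⟩
      exact ⟨q, by simp [hq], hle⟩

theorem gcnt_ahead (d' d : Int) (hd : d' ≤ d) :
    ∀ l : List Int, l.Pairwise (· < ·) → ∀ last last' : Int,
      (∀ q ∈ l, last < q) → (∀ q ∈ l, last' < q) →
      ((last' ≤ last → gcnt d l last ≤ gcnt d' l last') ∧
        gcnt d l last ≤ gcnt d' l last' + 1) := by
  intro l
  induction l with
  | nil => intro _ last last' _ _; simp [gcnt]
  | cons p l ih =>
    intro hpw last last' hl hl'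
    have hpw' : l.Pairwise (· < ·) := hpw.tail
    have hp_lt : ∀ q ∈ l, p < q := fun q hq => List.rel_of_pairwise_cons hpw hq
    have hlast : last < p := hl p (by simp)
    have hlast' : last' < p := hl' p (by simp)
    have hl2 : ∀ q ∈ l, last < q := fun q hq => hl q (by simp [hq])
    have hl2' : ∀ q ∈ l, last' < q := fun q hq => hl' q (by simp [hq])
    constructor
    · intro hle
      simp only [gcnt]
      by_cases hs : d ≤ p - last
      · rw [if_pos hs, if_pos (by omega)]
        have := (ih hpw' p p hp_lt hp_lt).1 le_rfl
        omega
      · rw [if_neg hs]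
        by_cases hs' : d' ≤ p - last'
        · rw [if_pos hs']
          have := (ih hpw' last p hl2 hp_lt).2
          omega
        · rw [if_neg hs']
          exact (ih hpw' last last' hl2 hl2').1 hle
    · simp only [gcnt]
      by_cases hs : d ≤ p - last
      · rw [if_pos hs]
        by_cases hs' : d' ≤ p - last'
        · rw [if_pos hs']
          have := (ih hpw' p p hp_lt hp_lt).1 le_rfl
          omega
        · rw [if_neg hs']
          have := (ih hpw' p last' hp_lt hl2').1 (by omega)
          omega
      · rw [if_neg hs]
        by_cases hs' : d' ≤ p - last'
        · rw [if_pos hs']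
          have := (ih hpw' last p hl2 hp_lt).2
          omega
        · rw [if_neg hs']
          exact (ih hpw' last last' hl2 hl2').2

theorem peaks_eq (A : List Int) : pvPeaks A = altPeaks A := by
  unfold pvPeaks altPeaks
  rw [PySem.List.foldl_append_ite_eq_filter
    (fun i => PySem.List.pyGetD A (i - 1) 0 < PySem.List.pyGetD A i 0 ∧
      PySem.List.pyGetD A (i + 1) 0 < PySem.List.pyGetD A i 0)]
  simp

theorem mem_altPeaks (A : List Int) (i : Int) :
    i ∈ altPeaks A ↔ (1 ≤ i ∧ i < PySem.List.len A - 1 ∧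
      PySem.List.pyGetD A (i - 1) 0 < PySem.List.pyGetD A i 0 ∧
      PySem.List.pyGetD A (i + 1) 0 < PySem.List.pyGetD A i 0) := by
  unfold altPeaks
  rw [List.mem_filter, PySem.List.mem_pyRange_one]
  simp [and_assoc]

theorem altPeaks_sorted (A : List Int) : (altPeaks A).Pairwise (· < ·) :=
  List.Pairwise.sublist List.filter_sublist (PySem.List.pairwise_lt_pyRange_one 1 (PySem.List.len A - 1))

theorem altPeaks_gap2 (A : List Int) : (altPeaks A).Pairwise (fun a b => a + 2 ≤ b) := by
  refine List.Pairwise.imp_of_mem (fun {a b} ha hb hr => ?_) (altPeaks_sorted A)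
  rcases (mem_altPeaks A a).mp ha with ⟨_, _, _, ha2⟩
  rcases (mem_altPeaks A b).mp hb with ⟨_, _, hb1, _⟩
  by_contra hc
  have hb' : b = a + 1 := by omega
  subst hb'
  have : a + 1 - 1 = a := by omega
  rw [this] at hb1
  omega

theorem placeLoop_eq (peaks : List Int) (k : Int) (j : Nat) (last count : Int)
    (hcount : count < k) :
    pvPlaceLoop peaks k (PySem.List.pyRange (j : Int) (PySem.List.len peaks) 1) last count
      = decide (k ≤ count + gcnt k (peaks.drop j) last) := by
  by_cases hj : j < peaks.length
  case neg =>
    rw [PySem.List.pyRange_one_eq_nil (by simp [PySem.List.len_eq]; omega),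
      List.drop_of_length_le (by omega)]
    simp only [gcnt, pvPlaceLoop]
    symm
    simp only [decide_eq_false_iff_not]
    omega
  case pos =>
    have hlt : (j : Int) < PySem.List.len peaks := by simp [PySem.List.len_eq]; omega
    rw [PySem.List.pyRange_one_cons hlt]
    have hdrop : peaks.drop j = peaks[j] :: peaks.drop (j + 1) :=
      List.drop_eq_getElem_cons hj
    rw [hdrop]
    simp only [pvPlaceLoop]
    have hget : PySem.List.pyGetD peaks (j : Int) 0 = peaks[j] := by
      rw [PySem.List.pyGetD_eq_getElem peaks 0 (by omega) hlt]
      simp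
    rw [hget]
    have hj1 : ((j : Int) + 1) = ((j + 1 : Nat) : Int) := by push_cast; ring
    by_cases hs : k ≤ peaks[j] - last
    · rw [if_pos hs]
      simp only
      by_cases he : count + 1 = k
      · rw [if_pos he]
        have : k ≤ count + (gcnt k (peaks.drop (j+1)) peaks[j] + 1) := by
          have := gcnt_nonneg k (peaks.drop (j+1)) peaks[j]
          omega
        simp [gcnt, if_pos hs, this]
      · rw [if_neg he, hj1, placeLoop_eq peaks k (j+1) peaks[j] (count+1) (by omega)]
        simp only [gcnt, if_pos hs]
        congr 1
        simp only [eq_iff_iff]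
        omega
    · rw [if_neg hs]
      simp only
      rw [if_neg (by omega), hj1, placeLoop_eq peaks k (j+1) last count hcount]
      simp only [gcnt, if_neg hs]
termination_by peaks.length - j

theorem placeLoop_one_false (peaks : List Int) (is : List Int) (last count : Int)
    (h : 2 ≤ count) : pvPlaceLoop peaks 1 is last count = false := by
  induction is generalizing last count with
  | nil => rfl
  | cons i is ih =>
    simp only [pvPlaceLoop]
    by_cases hs : (1:Int) ≤ PySem.List.pyGetD peaks i 0 - last
    · rw [if_pos hs]; rw [if_neg (by simp; omega)]; exact ih _ _ (by omega)
    · rw [if_neg hs]; rw [if_neg (by simp; omega)]; exact ih _ _ (by omega)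

theorem place_eq (p0 : Int) (tl : List Int) (k : Int) (hk : 2 ≤ k) :
    pvPlace (p0 :: tl) k = decide (k ≤ 1 + gcnt k tl p0) := by
  unfold pvPlace
  have h0 : PySem.List.pyGetD (p0 :: tl) 0 0 = p0 := PySem.List.pyGetD_zero_cons _ _ _
  rw [h0]
  simpa using placeLoop_eq (p0 :: tl) k 1 p0 1 (by omega)

theorem sorted_getElem_le (l : List Int) (h : l.Pairwise (· < ·)) (i j : Nat)
    (hij : i ≤ j) (hj : j < l.length) : l[i] ≤ l[j] := by
  rcases Nat.eq_or_lt_of_le hij with rfl | hlt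
  · exact le_refl _
  · exact le_of_lt ((List.pairwise_iff_getElem.mp h) i j (by omega) hj hlt)

theorem altBisect_inv (peaks : List Int) (hpw : peaks.Pairwise (· < ·)) (x lo hi : Int)
    (h0 : 0 ≤ lo) (hlh : lo ≤ hi) (hh : hi ≤ peaks.length)
    (hlow : ∀ i : Nat, (hi_ : i < peaks.length) → (i : Int) < lo → peaks[i] < x)
    (hhigh : ∀ i : Nat, (hi_ : i < peaks.length) → hi ≤ (i : Int) → x ≤ peaks[i]) :
    lo ≤ altBisect peaks x lo hi ∧ altBisect peaks x lo hi ≤ hi ∧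
      (∀ i : Nat, (hi_ : i < peaks.length) → (i : Int) < altBisect peaks x lo hi → peaks[i] < x) ∧
      (∀ i : Nat, (hi_ : i < peaks.length) → altBisect peaks x lo hi ≤ (i : Int) → x ≤ peaks[i]) := by
  rw [altBisect.eq_def]
  split
  case isFalse h => exact ⟨le_refl _, by omega, hlow, fun i hi_ hge => hhigh i hi_ (by omega)⟩
  case isTrue h =>
    have hmid := PySem.Int.floordiv_two_mid_bounds (lo := lo) (hi := hi) (le_of_lt h)
    have hmlt : PySem.Int.floordiv (lo + hi) 2 < hi := by
      rw [PySem.Int.floordiv_lt_iff_lt_mul (by omega)]; omega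
    dsimp only
    have hmidn : (PySem.Int.floordiv (lo + hi) 2).toNat < peaks.length := by omega
    have hget : PySem.List.pyGetD peaks (PySem.Int.floordiv (lo + hi) 2) 0
        = peaks[(PySem.Int.floordiv (lo + hi) 2).toNat] :=
      PySem.List.pyGetD_eq_getElem peaks 0 (by omega) (by omega)
    rw [hget]
    split
    case isTrue hv =>
      have hrec := altBisect_inv peaks hpw x (PySem.Int.floordiv (lo + hi) 2 + 1) hi
        (by omega) (by omega) hh
        (fun i hi_ hlt => by
          by_cases hc : (i : Int) < lo
          · exact hlow i hi_ hc
          · calc peaks[i] ≤ peaks[(PySem.Int.floordiv (lo + hi) 2).toNat] :=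
                sorted_getElem_le peaks hpw i _ (by omega) hmidn
              _ < x := hv)
        hhigh
      exact ⟨by omega, by omega, hrec.2.2.1, hrec.2.2.2⟩
    case isFalse hv =>
      have hrec := altBisect_inv peaks hpw x lo (PySem.Int.floordiv (lo + hi) 2)
        h0 (by omega) (by omega) hlow
        (fun i hi_ hge => by
          have : x ≤ peaks[(PySem.Int.floordiv (lo + hi) 2).toNat] := by omega
          calc x ≤ peaks[(PySem.Int.floordiv (lo + hi) 2).toNat] := this
            _ ≤ peaks[i] := sorted_getElem_le peaks hpw _ i (by omega) hi_)
      exact ⟨by omega, by omega, hrec.2.2.1, hrec.2.2.2⟩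
termination_by (hi - lo).toNat
decreasing_by all_goals omega

theorem canLoop_eq (peaks : List Int) (hpw : peaks.Pairwise (· < ·)) (d : Int) (hd : 1 ≤ d)
    (c pos : Int) (l0 l : List Int) (hsplit : peaks = l0 ++ l)
    (hle : ∀ q ∈ l0, q ≤ pos) (hc1 : 1 ≤ c) (hcd : c ≤ d) :
    altCanLoop peaks d pos c = min d (c + gcnt d l pos) := by
  rw [altCanLoop.eq_def]
  split
  case isFalse h =>
    have := gcnt_nonneg d l pos
    omega
  case isTrue h =>
    dsimp only
    have hlen : PySem.List.len peaks = (peaks.length : Int) := by simp [PySem.List.len_eq]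
    have hb := altBisect_inv peaks hpw (pos + d) 0 (PySem.List.len peaks)
      (by omega) (by omega) (by omega)
      (fun i hi_ hlt => by omega) (fun i hi_ hge => by omega)
    set r := altBisect peaks (pos + d) 0 (PySem.List.len peaks) with hr
    split
    case isTrue hrl =>
      -- no peak ≥ pos + d : every element of l is < pos + d
      have hz : gcnt d l pos = 0 := by
        apply gcnt_zero
        intro q hq
        have hqp : q ∈ peaks := by rw [hsplit]; exact List.mem_append_right _ hq
        obtain ⟨i, hi, rfl⟩ := List.getElem_of_mem hqp
        have := hb.2.2.1 i hi (by omega)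
        omega
      rw [hz]; omega
    case isFalse hrl =>
      have hrlt : r < (peaks.length : Int) := by omega
      have hrn : r.toNat < peaks.length := by omega
      have hget : PySem.List.pyGetD peaks r 0 = peaks[r.toNat] :=
        PySem.List.pyGetD_eq_getElem peaks 0 (by omega) (by omega)
      have hpx : pos + d ≤ peaks[r.toNat] := hb.2.2.2 r.toNat hrn (by omega)
      -- the elements of l0 all sit strictly before index r.toNat
      have hl0len : l0.length ≤ r.toNat := by
        by_contra hcon
        have hl0 : r.toNat < l0.length := by omega
        have : peaks[r.toNat] = l0[r.toNat]'hl0 := by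
          rw [List.getElem_of_eq hsplit]; exact List.getElem_append_left hl0
        have hmem : peaks[r.toNat] ∈ l0 := by rw [this]; exact List.getElem_mem _
        have := hle _ hmem
        omega
      -- split l as (prefix of small elements) ++ peaks[r] :: tail
      have htk : (peaks.take r.toNat).length = r.toNat := by simp; omega
      have hpeaks2 : peaks = peaks.take r.toNat ++ peaks[r.toNat] :: peaks.drop (r.toNat + 1) := by
        conv_lhs => rw [← List.take_append_drop r.toNat peaks]
        rw [List.drop_eq_getElem_cons hrn]
      have hldrop : l = List.drop l0.length peaks := by rw [hsplit, List.drop_left]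
      have hleq : l = (peaks.take r.toNat).drop l0.length ++
          peaks[r.toNat] :: peaks.drop (r.toNat + 1) := by
        rw [hldrop]
        conv_lhs => rw [hpeaks2]
        rw [List.drop_append_of_le_length (by omega)]
      have hsmall : ∀ q ∈ (peaks.take r.toNat).drop l0.length, q - pos < d := by
        intro q hq
        have hq' : q ∈ peaks.take r.toNat := List.mem_of_mem_drop hq
        obtain ⟨i, hi, rfl⟩ := List.getElem_of_mem hq'
        have hilen : i < peaks.length := by simp at hi; omega
        have := hb.2.2.1 i hilen (by simp at hi; omega)
        simp only [List.getElem_take]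
        omega
      have hgl : gcnt d l pos = gcnt d (peaks.drop (r.toNat + 1)) peaks[r.toNat] + 1 := by
        rw [hleq, gcnt_skip d _ _ pos hsmall]
        simp only [gcnt]
        rw [if_pos (by omega)]
      have hrec := canLoop_eq peaks hpw d hd (c + 1) peaks[r.toNat]
        (peaks.take (r.toNat + 1)) (peaks.drop (r.toNat + 1))
        (by rw [List.take_append_drop])
        (by
          intro q hq
          obtain ⟨i, hi, rfl⟩ := List.getElem_of_mem hq
          simp only [List.getElem_take]
          have hi' : i < peaks.length := by simp at hi; omega
          exact sorted_getElem_le peaks hpw i r.toNat (by simp at hi; omega) hrn)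
        (by omega) (by omega)
      rw [hget, hrec, hgl]
      omega
termination_by (d - c).toNat
decreasing_by omega

theorem altCan_eq (p0 : Int) (tl : List Int) (hpw : (p0 :: tl).Pairwise (· < ·))
    (d : Int) (hd : 1 ≤ d) :
    altCan (p0 :: tl) d = decide (d ≤ 1 + gcnt d tl p0) := by
  unfold altCan
  rw [PySem.List.pyGetD_zero_cons]
  rw [canLoop_eq (p0 :: tl) hpw d hd 1 p0 [p0] tl rfl (by simp) (by omega) hd]
  simp only [decide_eq_decide]
  have := gcnt_nonneg d tl p0
  omega

theorem altKmax_spec (span k : Int) (hk : 1 ≤ k) :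
    k ≤ altKmax span k ∧ span < altKmax span k * (altKmax span k + 1) := by
  rw [altKmax.eq_def]
  split
  case isTrue h =>
    have := altKmax_spec span (k + 1) (by omega)
    exact ⟨by omega, this.2⟩
  case isFalse h => exact ⟨le_refl _, by omega⟩
termination_by (span + 2 - k).toNat
decreasing_by
  have hb : k < span + 1 := by nlinarith [sq_nonneg k]
  omega

theorem altDesc_spec (peaks : List Int) (d : Int) (h1 : 1 ≤ d) :
    1 ≤ altDesc peaks d ∧ altDesc peaks d ≤ d ∧
      (altCan peaks (altDesc peaks d) = true ∨ altDesc peaks d = 1) ∧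
      (∀ j, altDesc peaks d < j → j ≤ d → altCan peaks j = false) := by
  rw [altDesc.eq_def]
  split
  case isTrue h =>
    have hrec := altDesc_spec peaks (d - 1) (by omega)
    refine ⟨hrec.1, by omega, hrec.2.2.1, ?_⟩
    intro j hj1 hj2
    rcases eq_or_lt_of_le hj2 with rfl | hlt
    · simpa using h.2
    · exact hrec.2.2.2 j hj1 (by omega)
  case isFalse h =>
    refine ⟨h1, le_refl _, ?_, by omega⟩
    by_cases hd1 : d = 1
    · exact Or.inr hd1
    · refine Or.inl ?_
      rcases hc : altCan peaks d with _ | _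
      · exact absurd ⟨by omega, by simp [hc]⟩ h
      · rfl
termination_by (d - 1).toNat
decreasing_by omega

theorem place_one_false (p0 p1 : Int) (tl : List Int) (h : p0 < p1) :
    pvPlace (p0 :: p1 :: tl) 1 = false := by
  unfold pvPlace
  rw [PySem.List.pyGetD_zero_cons]
  have hlen : (1 : Int) < PySem.List.len (p0 :: p1 :: tl) := by
    simp only [PySem.List.len_eq, List.length_cons]; push_cast; omega
  rw [PySem.List.pyRange_one_cons hlen]
  simp only [pvPlaceLoop]
  have hget : PySem.List.pyGetD (p0 :: p1 :: tl) 1 0 = p1 := by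
    have h1 : ((1:Int)) = ((1:Nat) : Int) := by norm_num
    rw [h1, PySem.List.pyGetD_eq_getElem _ 0 (by omega) (by simp)]
    simp
  rw [hget]
  rw [if_pos (show (1:Int) ≤ p1 - p0 by omega)]
  simp only
  rw [if_neg (by norm_num)]
  apply placeLoop_one_false
  omega

theorem five_peaks_gcnt3 (p0 p1 p2 p3 p4 : Int) (rest : List Int)
    (hgap : (p0 :: p1 :: p2 :: p3 :: p4 :: rest).Pairwise (fun a b => a + 2 ≤ b)) :
    2 ≤ gcnt 3 (p1 :: p2 :: p3 :: p4 :: rest) p0 := by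
  simp only [List.pairwise_cons] at hgap
  obtain ⟨h0, h1, h2, h3, _⟩ := hgap
  have h01 : p0 + 2 ≤ p1 := h0 p1 (by simp)
  have h12 : p1 + 2 ≤ p2 := h1 p2 (by simp)
  have h23 : p2 + 2 ≤ p3 := h2 p3 (by simp)
  have h34 : p3 + 2 ≤ p4 := h3 p4 (by simp)
  by_cases hs : (3:Int) ≤ p1 - p0
  · rw [gcnt, if_pos hs]
    have : 1 ≤ gcnt 3 (p2 :: p3 :: p4 :: rest) p1 :=
      gcnt_pos 3 _ p1 ⟨p3, by simp, by omega⟩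
    omega
  · rw [gcnt, if_neg hs, gcnt, if_pos (by omega)]
    have : 1 ≤ gcnt 3 (p3 :: p4 :: rest) p2 :=
      gcnt_pos 3 _ p2 ⟨p4, by simp, by omega⟩
    omega

theorem mem_le_getLast (l : List Int) (hpw : l.Pairwise (· < ·)) (p : Int) (hp : p ∈ l)
    (hne : l ≠ []) : p ≤ l.getLast hne := by
  obtain ⟨i, hi, rfl⟩ := List.getElem_of_mem hp
  rw [List.getLast_eq_getElem]
  exact sorted_getElem_le l hpw i (l.length - 1) (by omega) (by omega)

theorem bsearch_eq (peaks : List Int) (SR : Int)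
    (hp1 : pvPlace peaks 1 = false)
    (hp : ∀ j, 2 ≤ j → (pvPlace peaks j = true ↔ j ≤ SR))
    (hSR2 : 2 ≤ SR)
    (hL : 5 ≤ (peaks.length : Int) → 3 ≤ SR)
    (start e ans : Int)
    (h1 : 1 ≤ start) (he : e ≤ (peaks.length : Int))
    (hbad : ¬(start = 1 ∧ e = 2 ∧ ans = 0))
    (hidx : (ans = SR ∧ start = SR + 1) ∨
      (((ans = 0 ∧ start = 1) ∨ (ans = start - 1 ∧ 1 ≤ ans)) ∧
        ans < SR ∧ start ≤ SR ∧ SR ≤ e)) :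
    pvBsearch peaks start e ans = SR := by
  rw [pvBsearch.eq_def]
  split
  case isFalse h =>
    rcases hidx with ⟨rfl, _⟩ | ⟨_, _, h2, h3⟩
    · rfl
    · omega
  case isTrue h =>
    dsimp only
    have hmid := PySem.Int.floordiv_two_mid_bounds (lo := start) (hi := e) h
    set mid := PySem.Int.floordiv (start + e) 2 with hmid_def
    by_cases hm1 : mid = 1
    · -- mid = 1 is impossible under the invariant
      exfalso
      have hse : start + e < 4 := by
        have := (PySem.Int.floordiv_lt_iff_lt_mul (a := start + e) (b := 2) (q := 2) (by omega)).mp (by omega)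
        omega
      rcases hidx with ⟨rfl, hst⟩ | ⟨hform, hlt, hsle, hre⟩
      · omega
      · -- start = 1, e ≤ 2, SR ≤ e and 2 ≤ SR force (1,2,0)
        have hst1 : start = 1 := by omega
        have he2 : e = 2 := by omega
        rcases hform with ⟨ha0, _⟩ | ⟨hae, hage⟩
        · exact hbad ⟨hst1, he2, ha0⟩
        · omega
    · have hm2 : 2 ≤ mid := by omega
      by_cases hpm : mid ≤ SR
      · rw [if_pos ((hp mid hm2).mpr hpm)]
        apply bsearch_eq peaks SR hp1 hp hSR2 hL (mid + 1) e mid (by omega) he (by omega)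
        rcases eq_or_lt_of_le hpm with rfl | hlt
        · exact Or.inl ⟨rfl, rfl⟩
        · refine Or.inr ⟨Or.inr ⟨by omega, by omega⟩, hlt, by omega, ?_⟩
          rcases hidx with ⟨rfl, hst⟩ | ⟨_, _, _, hre⟩
          · omega
          · exact hre
      · have hfalse : pvPlace peaks mid = false := by
          rcases hh : pvPlace peaks mid with _ | _
          · rfl
          · exact absurd ((hp mid hm2).mp hh) hpm
        rw [hfalse, if_neg (by simp)]
        apply bsearch_eq peaks SR hp1 hp hSR2 hL start (mid - 1) ans h1 (by omega)
        · -- new bad-state check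
          intro ⟨hst1, hm3, ha0⟩
          have hm3' : mid = 3 := by omega
          have he56 : 5 ≤ e := by
            have := (PySem.Int.le_floordiv_iff_mul_le (a := start + e) (b := 2) (q := 3) (by omega)).mp (by omega)
            omega
          have := hL (by omega)
          omega
        · rcases hidx with ⟨rfl, hst⟩ | ⟨hform, hlt, hsle, hre⟩
          · exact Or.inl ⟨rfl, hst⟩
          · exact Or.inr ⟨hform, hlt, hsle, by omega⟩
termination_by (e - start + 1).toNat
decreasing_by all_goals omega

theorem solution_eq (A : List Int) : solution A = solution_alt A := by
  unfold solution solution_alt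
  rw [peaks_eq A]
  by_cases hnil : altPeaks A = []
  · simp [hnil]
  · rw [if_neg hnil, if_neg hnil]
    obtain ⟨p0, tl, hcons⟩ := List.exists_cons_of_ne_nil hnil
    have hpw : (altPeaks A).Pairwise (· < ·) := altPeaks_sorted A
    have hgap : (altPeaks A).Pairwise (fun a b => a + 2 ≤ b) := altPeaks_gap2 A
    set peaks := altPeaks A with hpk
    -- abbreviations
    set n : Nat := peaks.length with hn
    have hg0 : PySem.List.pyGetD peaks 0 0 = p0 := by
      rw [hcons]; exact PySem.List.pyGetD_zero_cons _ _ _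
    have hspan : PySem.List.pyGetD peaks (-1) 0 - PySem.List.pyGetD peaks 0 0
        = peaks.getLast hnil - p0 := by
      rw [PySem.List.pyGetD_neg_one peaks 0 hnil, hg0]
    set span := PySem.List.pyGetD peaks (-1) 0 - PySem.List.pyGetD peaks 0 0 with hspan_def
    obtain ⟨hk1, hkspan⟩ := altKmax_spec span 1 (by omega)
    set kmax := altKmax span 1 with hkmax
    obtain ⟨hD1, hDk, hDcan, hDabove⟩ := altDesc_spec peaks kmax (by omega)
    set D := altDesc peaks kmax with hDdef
    set Q : Int → Prop := fun d => d ≤ 1 + gcnt d tl p0 with hQ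
    have htl_pw : tl.Pairwise (· < ·) := by
      have := hpw; rw [hcons] at this; exact this.tail
    have htl_gt : ∀ q ∈ tl, p0 < q := by
      have := hpw; rw [hcons, List.pairwise_cons] at this; exact this.1
    have hcan_iff : ∀ d : Int, 1 ≤ d → (altCan peaks d = true ↔ Q d) := by
      intro d hd
      rw [hcons, altCan_eq p0 tl (by rw [← hcons]; exact hpw) d hd]
      simp [hQ]
    have hQmono : ∀ i j : Int, 1 ≤ i → i ≤ j → Q j → Q i := by
      intro i j hi hij hQj
      have := (gcnt_ahead i j hij tl htl_pw p0 p0 htl_gt htl_gt).1 le_rfl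
      simp only [hQ] at hQj ⊢
      omega
    have hQ1 : Q 1 := by
      simp only [hQ]
      have := gcnt_nonneg 1 tl p0
      omega
    have hQD : Q D := by
      rcases hDcan with hc | h1
      · exact (hcan_iff D (by omega)).mp hc
      · rw [h1]; exact hQ1
    have hmemle : ∀ p ∈ tl, p ≤ peaks.getLast hnil := by
      intro p hp
      exact mem_le_getLast peaks hpw p (by rw [hcons]; exact List.mem_cons_of_mem _ hp) hnil
    have hp0le : p0 ≤ peaks.getLast hnil :=
      mem_le_getLast peaks hpw p0 (by rw [hcons]; exact List.mem_cons_self) hnil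
    have hnotQ : ∀ j : Int, D < j → ¬ Q j := by
      intro j hDj hQj
      by_cases hjk : j ≤ kmax
      · have := hDabove j hDj hjk
        rw [← Bool.not_eq_true, hcan_iff j (by omega)] at this
        exact this hQj
      · -- j > kmax : spacing-j flags would need span ≥ (j-1)*j > span
        have hj2 : 2 ≤ j := by omega
        have hg : j - 1 ≤ gcnt j tl p0 := by simp only [hQ] at hQj; omega
        obtain ⟨p, hpmem, hple⟩ := gcnt_span j tl p0 (j - 1) (by omega) hg
        have h1 : p0 + (j - 1) * j ≤ p := hple
        have h2 : p ≤ peaks.getLast hnil := hmemle p hpmem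
        have h3 : kmax * (kmax + 1) ≤ (j - 1) * j := by nlinarith
        rw [hspan] at hkspan
        omega
    have hDn : D ≤ (n : Int) := by
      have := gcnt_le_length D tl p0
      have hlen : tl.length + 1 = n := by rw [hn, hcons]; simp
      simp only [hQ] at hQD
      omega
    have hlenI : PySem.List.len peaks = (n : Int) := by simp [PySem.List.len_eq, hn]
    rw [hlenI]
    by_cases h3 : (n : Int) < 3
    · rw [if_pos h3]
      -- n = 1 or n = 2
      have hn1 : 1 ≤ n := by
        have : peaks.length = tl.length + 1 := by rw [hcons]; simp
        omega
      have h3' : n < 3 := by exact_mod_cast h3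
      rcases (by omega : n = 1 ∨ n = 2) with hne | hne
      · -- n = 1
        omega
      · -- n = 2 : Q 2 holds
        have htl1 : ∃ p1, tl = [p1] := by
          have hplen : peaks.length = 2 := by omega
          rw [hcons] at hplen; simp at hplen
          cases tl with
          | nil => simp at hplen
          | cons p1 tl2 =>
            simp at hplen
            exact ⟨p1, by rw [hplen]⟩
        obtain ⟨p1, htl1⟩ := htl1
        have hQ2 : Q 2 := by
          have hgap01 : p0 + 2 ≤ p1 := by
            have := hgap; rw [hcons, htl1, List.pairwise_cons] at this
            exact this.1 p1 (by simp)
          simp only [hQ, htl1, gcnt]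
          rw [if_pos (by omega)]
          simp
        have : 2 ≤ D := by
          by_contra hc
          exact hnotQ 2 (by omega) hQ2
        omega
    · rw [if_neg h3]
      -- n ≥ 3 : binary search
      obtain ⟨p1, tl1, htl⟩ : ∃ p1 tl1, tl = p1 :: tl1 := by
        cases tl with
        | nil =>
          exfalso
          have : peaks.length = 1 := by rw [hcons]; simp
          omega
        | cons a b => exact ⟨a, b, rfl⟩
      have hgap01 : p0 + 2 ≤ p1 := by
        have := hgap; rw [hcons, htl, List.pairwise_cons] at this
        exact this.1 p1 (by simp)
      have hQ2 : Q 2 := by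
        simp only [hQ]
        have : 1 ≤ gcnt 2 tl p0 := gcnt_pos 2 tl p0 ⟨p1, by rw [htl]; simp, by omega⟩
        omega
      have hSR2 : 2 ≤ D := by
        by_contra hc
        exact hnotQ 2 (by omega) hQ2
      apply bsearch_eq peaks D
      · rw [hcons, htl]
        exact place_one_false p0 p1 tl1 (by omega)
      · intro j hj
        rw [hcons, place_eq p0 tl j hj]
        simp only [decide_eq_true_eq]
        constructor
        · intro hQj
          by_contra hc
          exact hnotQ j (by omega) hQj
        · intro hjD
          exact hQmono j D (by omega) hjD hQD
      · exact hSR2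
      · -- 5 peaks force D ≥ 3
        intro h5
        obtain ⟨p2, p3, p4, rest, hfive⟩ : ∃ p2 p3 p4 rest, tl1 = p2 :: p3 :: p4 :: rest := by
          have hlen5 : 5 ≤ tl1.length + 2 := by
            have : peaks.length = tl1.length + 2 := by rw [hcons, htl]; simp
            omega
          match tl1, hlen5 with
          | a :: b :: c :: r, _ => exact ⟨a, b, c, r, rfl⟩
        have hQ3 : Q 3 := by
          simp only [hQ, htl, hfive]
          have := five_peaks_gcnt3 p0 p1 p2 p3 p4 rest (by rw [← hfive, ← htl, ← hcons]; exact hgap)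
          omega
        by_contra hc
        exact hnotQ 3 (by omega) hQ3
      · omega
      · omega
      · omega
      · exact Or.inr ⟨Or.inl ⟨rfl, rfl⟩, by omega, by omega, by omega⟩

-- ===== VERDICT (by name: the statement is the Claim_ definition above) =====
theorem solution_spec : Claim_equal_solution := by
  intro A _
  exact solution_eq A
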